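-- pv_equiv track=rewrite | github.com/CHOIJun-0613/lang-parser-springboot | csa/services/sql_parser.py | extract_table_column_mapping
-- ===== SOURCE A (Python) =====
-- from typing import List, Dict, Any, Optional, Set, Tuple
--
-- def extract_table_column_mapping(sql_analysis: Dict[str, Any]) -> Dict[str, List[str]]:
--     """
--     SQL 분석 결과에서 테이블-컬럼 매핑을 추출합니다.
--
--     Args:
--         sql_analysis: SQL 분석 결과
--
--     Returns:
--         테이블별 컬럼 리스트를 담은 딕셔너리
--     """
--     table_column_mapping = {}
--
--     # 테이블 정보 수집
--     tables = sql_analysis.get('tables', [])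
--     for table in tables:
--         table_name = table['name']
--         if table_name not in table_column_mapping:
--             table_column_mapping[table_name] = []
--
--     # 컬럼 정보 수집
--     columns = sql_analysis.get('columns', [])
--     for column in columns:
--         column_name = column['name']
--         table_name = column.get('table')
--
--         if table_name and table_name in table_column_mapping:
--             table_column_mapping[table_name].append(column_name)
--         elif not table_name:
--             # 테이블 정보가 없는 경우, 모든 테이블에 추가
--             for table in tables:
--                 table_name = table['name']
--                 if column_name not in table_column_mapping[table_name]:
--                     table_column_mapping[table_name].append(column_name)
--
--     return table_column_mapping
-- ===== SOURCE B (Python) =====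
-- def extract_table_column_mapping(sql_analysis):
--     """Per-table gather: iterate unique table names and collect each table's
--     columns by one scan of the columns list, instead of scattering into a dict."""
--     tables = sql_analysis.get('tables', [])
--     columns = sql_analysis.get('columns', [])
--
--     uniq = []
--     for table in tables:
--         name = table['name']
--         if name not in uniq:
--             uniq.append(name)
--
--     def gather(t):
--         cols = []
--         for column in columns:
--             ct = column.get('table')
--             if ct:
--                 if ct == t:
--                     cols.append(column['name'])
--             elif column['name'] not in cols:
--                 cols.append(column['name'])
--         return cols
--
--     return {t: gather(t) for t in uniq}
-- ===== Notes on version B (the rewrite author's own statement) =====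
-- stated objective: alternative
-- what changed: B inverts the loop structure: instead of A's single scatter pass that inserts each column into a pre-built dict (with an inner broadcast loop for table-less columns), B iterates over the deduplicated table names and gathers each table's column list by one scan of the columns list, building the result as a dict comprehension.
import Mathlib
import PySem

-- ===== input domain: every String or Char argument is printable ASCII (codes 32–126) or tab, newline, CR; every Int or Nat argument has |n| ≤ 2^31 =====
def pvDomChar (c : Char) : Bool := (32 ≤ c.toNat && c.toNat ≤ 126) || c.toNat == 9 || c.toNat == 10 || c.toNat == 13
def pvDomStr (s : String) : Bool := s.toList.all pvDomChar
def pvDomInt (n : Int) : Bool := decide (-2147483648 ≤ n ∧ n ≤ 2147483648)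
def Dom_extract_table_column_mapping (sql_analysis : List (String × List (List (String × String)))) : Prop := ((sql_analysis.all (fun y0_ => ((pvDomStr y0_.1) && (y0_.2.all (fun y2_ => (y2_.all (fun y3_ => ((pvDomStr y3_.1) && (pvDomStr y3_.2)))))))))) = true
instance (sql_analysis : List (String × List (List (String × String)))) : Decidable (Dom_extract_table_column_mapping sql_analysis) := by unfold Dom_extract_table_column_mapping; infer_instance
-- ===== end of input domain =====

-- B gathers each table's column list by an outer loop over unique table names with an
-- inner scan of the columns list, instead of A's single scatter pass into a dict
-- (objective: alternative decomposition, same results).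

-- ===== PORT A =====
-- d['name'] (Pre_ guarantees the key is present; getD "" is never taken inside Pre_)
def pvName (d : List (String × String)) : String := (List.lookup "name" d).getD ""
-- Python truthiness of column.get('table'): not None and not ""
def pvTruthy (o : Option String) : Bool := match o with | none => false | some s => !(s == "")
-- 'k in mapping'
def pvContains (m : List (String × List String)) (k : String) : Bool := m.any (fun p => p.1 == k)
-- 'mapping[k].append(v)' on the association list (k present uniquely in A's mapping)
def pvAppendAt (m : List (String × List String)) (k : String) (v : String) : List (String × List String) :=
  m.map (fun p => if p.1 == k then (p.1, p.2 ++ [v]) else p)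
-- 'mapping[k]' (in A always called with k a table name, hence present; getD [] unreachable there)
def pvLookupD (m : List (String × List String)) (k : String) : List String := (List.lookup k m).getD []

-- body of A's 'for column in columns' loop
def pvStepA (tables : List (List (String × String))) (m : List (String × List String))
    (c : List (String × String)) : List (String × List String) :=
  let column_name := pvName c
  let table_name := List.lookup "table" c
  if pvTruthy table_name then
    if pvContains m (table_name.getD "") then pvAppendAt m (table_name.getD "") column_name else m
  else
    tables.foldl (fun m t =>
      let tn := pvName t
      if column_name ∈ pvLookupD m tn then m else pvAppendAt m tn column_name) m

def extract_table_column_mapping (sql_analysis : List (String × List (List (String × String)))) : List (String × List String) :=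
  let tables := (List.lookup "tables" sql_analysis).getD []
  let m0 := tables.foldl (fun m t =>
    let tn := pvName t
    if pvContains m tn then m else m ++ [(tn, [])]) []
  let columns := (List.lookup "columns" sql_analysis).getD []
  columns.foldl (pvStepA tables) m0

-- ===== PORT B =====
-- dedup of table names in first-occurrence order ('uniq' loop of Source B)
def pvUniq (tables : List (List (String × String))) : List String :=
  tables.foldl (fun u t => let n := pvName t; if n ∈ u then u else u ++ [n]) []

-- body of Source B's inner 'for column in columns' loop of gather
def pvStepB (t : String) (cols : List String) (c : List (String × String)) : List String :=
  let ct := List.lookup "table" c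
  if pvTruthy ct then
    (if ct.getD "" == t then cols ++ [pvName c] else cols)
  else if pvName c ∈ cols then cols else cols ++ [pvName c]

-- Source B's gather(t)
def pvGather (columns : List (List (String × String))) (t : String) : List String :=
  columns.foldl (pvStepB t) []

-- the dict comprehension {t: gather(t) for t in uniq}: keys of uniq are distinct, so the
-- resulting insertion-ordered dict is exactly this map
def extract_table_column_mapping_alt (sql_analysis : List (String × List (List (String × String)))) : List (String × List String) :=
  let tables := (List.lookup "tables" sql_analysis).getD []
  let columns := (List.lookup "columns" sql_analysis).getD []
  (pvUniq tables).map (fun t => (t, pvGather columns t))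

-- ===== PRECONDITION & SPEC =====
-- Pre_ excludes exactly the inputs where Python A raises KeyError: a table or column dict without a 'name' key.
def Pre_extract_table_column_mapping (sql_analysis : List (String × List (List (String × String)))) : Prop :=
  ((((List.lookup "tables" sql_analysis).getD []).all (fun t => (List.lookup "name" t).isSome))
   && (((List.lookup "columns" sql_analysis).getD []).all (fun c => (List.lookup "name" c).isSome))) = true
instance (sql_analysis : List (String × List (List (String × String)))) : Decidable (Pre_extract_table_column_mapping sql_analysis) := by unfold Pre_extract_table_column_mapping; infer_instance

def pvWitness_extract_table_column_mapping : (List (String × List (List (String × String)))) :=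
  [("tables", [[("name", "t1")], [("name", "t2")]]),
   ("columns", [[("name", "a"), ("table", "t1")], [("name", "b")]])]

def Spec_extract_table_column_mapping (sql_analysis : List (String × List (List (String × String)))) (out : List (String × List String)) : Prop := out = extract_table_column_mapping_alt sql_analysis
instance (sql_analysis : List (String × List (List (String × String)))) (out : List (String × List String)) : Decidable (Spec_extract_table_column_mapping sql_analysis out) := by unfold Spec_extract_table_column_mapping; infer_instance

-- ===== CLAIM (what is proved, stated in full; the proofs are below) =====
def Claim_equal_extract_table_column_mapping : Prop := ∀ (sql_analysis : List (String × List (List (String × String)))), Dom_extract_table_column_mapping sql_analysis → Pre_extract_table_column_mapping sql_analysis → Spec_extract_table_column_mapping sql_analysis (extract_table_column_mapping sql_analysis)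

-- ===== LEMMAS AND PROOFS =====

-- lookup in a 'mapping in map form': value is a function of the key
theorem lookup_map_fn (U : List String) (f : String → List String) (k : String) :
    List.lookup k (U.map (fun t => (t, f t))) = if k ∈ U then some (f k) else none := by
  induction U with
  | nil => simp
  | cons u us ih =>
    simp only [List.map_cons, List.lookup_cons, List.mem_cons]
    by_cases h : k = u
    · subst h; simp
    · have hne : (k == u) = false := by simp [h]
      simp [hne, ih, h]

theorem contains_map_fn (U : List String) (f : String → List String) (k : String) :
    pvContains (U.map (fun t => (t, f t))) k = decide (k ∈ U) := by
  induction U with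
  | nil => simp [pvContains]
  | cons u us ih =>
    simp only [pvContains, List.map_cons, List.any_cons] at *
    by_cases h : u = k
    · simp [h, ih]
    · have h2 : ¬k = u := fun hh => h hh.symm
      simp [ih, h, h2]

theorem appendAt_map_fn (U : List String) (f : String → List String) (k v : String) :
    pvAppendAt (U.map (fun t => (t, f t))) k v
      = U.map (fun t => (t, if t = k then f t ++ [v] else f t)) := by
  simp only [pvAppendAt, List.map_map]
  apply List.map_congr_left
  intro t _
  by_cases h : t = k <;> simp [h]

-- A's broadcast loop on a mapping in map form: it applies the dedup-append pointwise
-- to every key that is a name of a processed table.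
theorem broadcast_map_fn (ts : List (List (String × String))) (U : List String)
    (f : String → List String) (v : String) :
    ts.foldl (fun m t => let tn := pvName t;
        if v ∈ pvLookupD m tn then m else pvAppendAt m tn v)
      (U.map (fun t => (t, f t)))
    = U.map (fun t => (t, if t ∈ ts.map pvName then (if v ∈ f t then f t else f t ++ [v]) else f t)) := by
  induction ts generalizing f with
  | nil => simp
  | cons c cs ih =>
    simp only [List.foldl_cons]
    have hstep : (let tn := pvName c;
        if v ∈ pvLookupD (U.map (fun t => (t, f t))) tn then (U.map (fun t => (t, f t)))
        else pvAppendAt (U.map (fun t => (t, f t))) tn v)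
        = U.map (fun t => (t, if t = pvName c then (if v ∈ f t then f t else f t ++ [v]) else f t)) := by
      simp only [pvLookupD, lookup_map_fn]
      by_cases hmem : pvName c ∈ U
      · simp only [hmem, if_pos, Option.getD_some]
        by_cases hv : v ∈ f (pvName c)
        · simp only [hv, if_pos]
          apply List.map_congr_left; intro t _
          by_cases h : t = pvName c <;> simp [h, hv]
        · simp only [hv, if_neg, not_false_iff]
          rw [appendAt_map_fn]
          apply List.map_congr_left; intro a _
          by_cases h : a = pvName c
          · subst h; simp [hv]
          · simp [h]
      · simp only [hmem, if_neg, not_false_iff, Option.getD_none, List.not_mem_nil, if_neg]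
        rw [appendAt_map_fn]
        apply List.map_congr_left; intro t ht
        have : t ≠ pvName c := fun h => hmem (h ▸ ht)
        simp [this]
    rw [hstep, ih (fun t => if t = pvName c then (if v ∈ f t then f t else f t ++ [v]) else f t)]
    apply List.map_congr_left; intro t _
    simp only [List.map_cons, List.mem_cons]
    have hvh : ∀ (l : List String), v ∈ (if v ∈ l then l else l ++ [v]) := by
      intro l; by_cases hv : v ∈ l <;> simp [hv]
    by_cases h1 : t = pvName c
    · subst h1
      by_cases h2 : pvName c ∈ cs.map pvName
      · simp [h2, hvh]
      · simp [h2]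
    · by_cases h2 : t ∈ cs.map pvName <;> simp [h1, h2]

-- pvUniq's members are exactly table names
theorem mem_foldl_uniq (ts : List (List (String × String))) (u : List String) (x : String) :
    x ∈ ts.foldl (fun u t => let n := pvName t; if n ∈ u then u else u ++ [n]) u ↔
      x ∈ u ∨ x ∈ ts.map pvName := by
  induction ts generalizing u with
  | nil => simp
  | cons c cs ih =>
    simp only [List.foldl_cons, List.map_cons, List.mem_cons]
    by_cases h : pvName c ∈ u
    · rw [if_pos h, ih]
      constructor
      · rintro (hx | hx)
        · exact Or.inl hx
        · exact Or.inr (Or.inr hx)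
      · rintro (hx | hx | hx)
        · exact Or.inl hx
        · exact Or.inl (hx ▸ h)
        · exact Or.inr hx
    · rw [if_neg h, ih]
      simp only [List.mem_append, List.mem_singleton]
      tauto

theorem mem_uniq_iff (ts : List (List (String × String))) (x : String) :
    x ∈ pvUniq ts ↔ x ∈ ts.map pvName := by
  rw [pvUniq, mem_foldl_uniq]; simp

-- ONE step of A's column loop, on a mapping in map form over the unique table names,
-- acts pointwise as Source B's inner-loop step.
theorem stepA_map_fn (tables : List (List (String × String))) (f : String → List String)
    (c : List (String × String)) :
    pvStepA tables ((pvUniq tables).map (fun t => (t, f t))) c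
      = (pvUniq tables).map (fun t => (t, pvStepB t (f t) c)) := by
  simp only [pvStepA, pvStepB]
  by_cases htr : pvTruthy (List.lookup "table" c)
  · simp only [htr, if_pos]
    rw [contains_map_fn]
    by_cases hmem : (List.lookup "table" c).getD "" ∈ pvUniq tables
    · simp only [hmem, decide_true, if_pos, appendAt_map_fn]
      apply List.map_congr_left; intro t _
      by_cases h : ((List.lookup "table" c).getD "" == t)
      · have h' : t = (List.lookup "table" c).getD "" := (eq_of_beq h).symm
        simp [h']
      · have h' : t ≠ (List.lookup "table" c).getD "" := by
          intro hh; exact h (by simp [hh])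
        simp [h', Ne.symm h']
    · simp only [hmem, decide_false, Bool.false_eq_true, if_neg, not_false_iff]
      apply List.map_congr_left; intro t ht
      have : ¬((List.lookup "table" c).getD "" == t) := by
        intro hh; exact hmem ((eq_of_beq hh) ▸ ht)
      simp [this]
  · simp only [htr, if_neg, Bool.not_eq_true]
    rw [broadcast_map_fn]
    apply List.map_congr_left; intro t ht
    have : t ∈ tables.map pvName := (mem_uniq_iff tables t).mp ht
    simp [this]

-- A's whole column loop in map form equals the per-table gather fold
theorem colloop_map_fn (tables columns : List (List (String × String))) (f : String → List String) :
    columns.foldl (pvStepA tables) ((pvUniq tables).map (fun t => (t, f t)))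
      = (pvUniq tables).map (fun t => (t, columns.foldl (pvStepB t) (f t))) := by
  induction columns generalizing f with
  | nil => simp
  | cons c cs ih =>
    simp only [List.foldl_cons]
    rw [stepA_map_fn tables f c, ih (fun t => pvStepB t (f t) c)]

-- contains on the phase-1 accumulator in map form
theorem phase1_map_fn (ts : List (List (String × String))) (u : List String) :
    ts.foldl (fun m t => let tn := pvName t; if pvContains m tn then m else m ++ [(tn, [])])
        (u.map (fun t => (t, ([] : List String))))
      = (ts.foldl (fun u t => let n := pvName t; if n ∈ u then u else u ++ [n]) u).map
          (fun t => (t, ([] : List String))) := by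
  induction ts generalizing u with
  | nil => simp
  | cons c cs ih =>
    simp only [List.foldl_cons]
    rw [contains_map_fn]
    by_cases h : pvName c ∈ u
    · simp only [h, decide_true, if_pos]; exact ih u
    · simp only [h, decide_false, Bool.false_eq_true, if_neg, not_false_iff]
      have : u.map (fun t => (t, ([] : List String))) ++ [(pvName c, [])]
          = (u ++ [pvName c]).map (fun t => (t, ([] : List String))) := by simp
      rw [this]; exact ih (u ++ [pvName c])

-- ===== VERDICT (by name: the statement is the Claim_ definition above) =====
theorem extract_table_column_mapping_spec : Claim_equal_extract_table_column_mapping := by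
  intro sql _hdom _hpre
  unfold Spec_extract_table_column_mapping extract_table_column_mapping extract_table_column_mapping_alt
  simp only []
  have h1 := phase1_map_fn ((List.lookup "tables" sql).getD []) []
  simp only [List.map_nil] at h1
  rw [h1]
  exact colloop_map_fn _ _ (fun _ => [])
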